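-- pv_equiv track=rewrite | github.com/Fabio-Trindade/Eng-Aprendizado-M-quina | src/utils/util_pre_processor.py | transform_values_in_classes
-- ===== SOURCE A (Python) =====
-- def transform_values_in_classes(values: list):
--     value_to_class = {}
--     class_to_value = {}
--     new_list = []
--     classs = 0
--     for value in values:
--         if value_to_class.get(value) == None:
--             value_to_class[value] = classs
--             class_to_value[classs] = value
--             classs += 1
--         new_list.append(value_to_class[value])
--     return value_to_class, class_to_value, new_list
-- ===== SOURCE B (Python) =====
-- def transform_values_in_classes(values: list):
--     # pass 1: distinct values in first-occurrence order
--     seen = set()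
--     order = []
--     for v in values:
--         if v not in seen:
--             seen.add(v)
--             order.append(v)
--     # pass 2: build both lookup tables from the ordered distinct list
--     value_to_class = {v: i for i, v in enumerate(order)}
--     class_to_value = {i: v for i, v in enumerate(order)}
--     # pass 3: map the input through the table
--     new_list = [value_to_class[v] for v in values]
--     return value_to_class, class_to_value, new_list
-- ===== Notes on version B (the rewrite author's own statement) =====
-- stated objective: alternative
-- what changed: Replaces A's single interleaved loop (which grows both dicts and the output list while counting classes) by three separate passes: dedup with a seen-set preserving first-occurrence order, then both tables built by enumerate over the distinct list, then the output list as a plain table lookup over the input.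
import Mathlib
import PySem

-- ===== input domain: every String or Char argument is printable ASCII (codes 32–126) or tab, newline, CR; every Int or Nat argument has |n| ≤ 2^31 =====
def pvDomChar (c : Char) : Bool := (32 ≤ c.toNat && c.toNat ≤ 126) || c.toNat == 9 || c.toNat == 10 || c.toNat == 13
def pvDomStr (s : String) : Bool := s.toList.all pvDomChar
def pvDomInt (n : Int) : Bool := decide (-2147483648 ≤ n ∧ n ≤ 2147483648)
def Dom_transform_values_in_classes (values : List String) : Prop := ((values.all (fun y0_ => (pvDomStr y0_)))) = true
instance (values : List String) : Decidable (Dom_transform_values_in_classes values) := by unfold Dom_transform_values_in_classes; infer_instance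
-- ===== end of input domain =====

-- B rewrites A's single interleaved loop as three separate passes (dedup-first, enumerate tables, map);
-- same results, same cost (objective: alternative decomposition).

-- ===== PORT A =====
-- one loop iteration of A: state = (value_to_class, class_to_value, new_list, classs)
def pvStepA (st : PySem.Dict String Int × PySem.Dict Int String × List Int × Int) (value : String) :
    PySem.Dict String Int × PySem.Dict Int String × List Int × Int :=
  let (v2c, c2v, nl, classs) := st
  if v2c.get? value = none then
    let v2c' := v2c.insert value classs
    let c2v' := c2v.insert classs value
    -- value_to_class[value]: the key is always present here, so getD's default never fires
    (v2c', c2v', nl ++ [(v2c'.get? value).getD 0], classs + 1)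
  else
    (v2c, c2v, nl ++ [(v2c.get? value).getD 0], classs)

def transform_values_in_classes (values : List String) :
    (List (String × Int)) × (List (Int × String)) × List Int :=
  let r := values.foldl pvStepA (PySem.Dict.empty, PySem.Dict.empty, [], 0)
  (r.1.items, r.2.1.items, r.2.2.1)

-- ===== PORT B =====
-- pass 2 of B: {v: i for i, v in enumerate(order)}
def pvMkV2C (order : List String) : PySem.Dict String Int :=
  (PySem.List.enumerate order).foldl (fun d p => d.insert p.2 p.1) PySem.Dict.empty

-- pass 2 of B: {i: v for i, v in enumerate(order)}
def pvMkC2V (order : List String) : PySem.Dict Int String :=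
  (PySem.List.enumerate order).foldl (fun d p => d.insert p.1 p.2) PySem.Dict.empty

def transform_values_in_classes_alt (values : List String) :
    (List (String × Int)) × (List (Int × String)) × List Int :=
  -- pass 1: seen-set loop; the Set IS the ordered distinct list, so it models seen and order at once
  let order : PySem.Set String := values.foldl PySem.Set.add PySem.Set.empty
  let value_to_class := pvMkV2C order
  let class_to_value := pvMkC2V order
  -- pass 3: value_to_class[v]; the key is always present, so getD's default never fires
  (value_to_class.items, class_to_value.items, values.map (fun v => value_to_class.getD v 0))

-- ===== PRECONDITION & SPEC =====
def Spec_transform_values_in_classes (values : List String) (out : (List (String × Int)) × (List (Int × String)) × List Int) : Prop := out = transform_values_in_classes_alt values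
instance (values : List String) (out : (List (String × Int)) × (List (Int × String)) × List Int) : Decidable (Spec_transform_values_in_classes values out) := by unfold Spec_transform_values_in_classes; infer_instance

-- ===== CLAIM (what is proved, stated in full; the proofs are below) =====
def Claim_equal_transform_values_in_classes : Prop := ∀ (values : List String), Dom_transform_values_in_classes values → Spec_transform_values_in_classes values (transform_values_in_classes values)

-- ===== LEMMAS AND PROOFS =====

-- B's dicts one appended distinct value at a time
theorem pvMkV2C_append (ord : List String) (x : String) :
    pvMkV2C (ord ++ [x]) = (pvMkV2C ord).insert x (ord.length : Int) := by
  simp [pvMkV2C, PySem.List.enumerate_append, List.foldl_append, PySem.List.enumerate_cons]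

theorem pvMkC2V_append (ord : List String) (x : String) :
    pvMkC2V (ord ++ [x]) = (pvMkC2V ord).insert (ord.length : Int) x := by
  simp [pvMkC2V, PySem.List.enumerate_append, List.foldl_append, PySem.List.enumerate_cons]

-- lookup in B's value_to_class = first index in order
theorem pv_get?_mkV2C (ord : List String) (hnd : ord.Nodup) (v : String) :
    (pvMkV2C ord).get? v = if v ∈ ord then some (ord.idxOf v : Int) else none := by
  induction ord using List.reverseRecOn with
  | nil => simp [pvMkV2C, PySem.List.enumerate_nil, PySem.Dict.get?_empty]
  | append_singleton xs x ih =>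
    have hx : x ∉ xs := by simp [List.nodup_append] at hnd; tauto
    have hxs : xs.Nodup := (List.nodup_append.mp hnd).1
    rw [pvMkV2C_append, PySem.Dict.get?_insert, ih hxs]
    by_cases hvx : v = x
    · subst hvx
      rw [List.idxOf_append_of_notMem hx]
      simp
    · simp only [if_neg hvx]
      by_cases hv : v ∈ xs
      · rw [if_pos hv, if_pos (by simp [hv]), List.idxOf_append_of_mem hv]
      · rw [if_neg hv, if_neg (by simp [hv, hvx])]

theorem pv_getD_mkV2C (ord : List String) (hnd : ord.Nodup) (v : String) (hv : v ∈ ord) :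
    (pvMkV2C ord).getD v 0 = (ord.idxOf v : Int) := by
  rw [PySem.Dict.getD_eq_get?_getD, pv_get?_mkV2C ord hnd v, if_pos hv]; rfl

theorem pv_nodup_add (s : PySem.Set String) (x : String) (h : s.Nodup) :
    (PySem.Set.add s x).Nodup := by
  unfold PySem.Set.add
  split
  · exact h
  · next hc =>
    have hx : x ∉ s := fun hm => hc (by simpa [PySem.Set.contains, List.contains_iff_mem] using hm)
    simp only [List.nodup_append, h, List.nodup_singleton, true_and]
    intro a ha b hb hab
    simp only [List.mem_singleton] at hb
    exact hx (hb ▸ hab ▸ ha)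

theorem pv_nodup_update (l : List String) (s : PySem.Set String) (h : s.Nodup) :
    (PySem.Set.update s l).Nodup := by
  induction l generalizing s with
  | nil => simpa [PySem.Set.update_nil] using h
  | cons x l ih => rw [PySem.Set.update_cons]; exact ih _ (pv_nodup_add s x h)

theorem pv_mem_update (l : List String) (s : PySem.Set String) (v : String) (hv : v ∈ l) :
    v ∈ PySem.Set.update s l := by
  rw [PySem.Set.update_eq_append_filter]
  by_cases hs : PySem.Set.contains s v = true
  · exact List.mem_append_left _ (by simpa [PySem.Set.contains, List.contains_iff_mem] using hs)
  · refine List.mem_append_right _ ?_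
    simp only [List.mem_filter, hs, Bool.not_false, and_true]
    simpa [PySem.Set.mem_ofList] using hv

theorem pv_add_of_not_mem (s : PySem.Set String) (x : String) (h : x ∉ s) :
    PySem.Set.add s x = s ++ [x] := by
  unfold PySem.Set.add
  rw [if_neg (by simpa [PySem.Set.contains, List.contains_iff_mem] using h)]

theorem pv_add_of_mem (s : PySem.Set String) (x : String) (h : x ∈ s) :
    PySem.Set.add s x = s := by
  unfold PySem.Set.add
  rw [if_pos (by simpa [PySem.Set.contains, List.contains_iff_mem] using h)]

-- idxOf is stable under the later appends an update performs
theorem pv_idxOf_update (l : List String) (s : PySem.Set String) (v : String) (hv : v ∈ s) :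
    (PySem.Set.update s l).idxOf v = s.idxOf v := by
  rw [PySem.Set.update_eq_append_filter, List.idxOf_append_of_mem hv]

-- the values A appends to new_list, one per input element, with the order evolving as in A
def pvNlSpec (ord : List String) : List String → List Int
  | [] => []
  | v :: l =>
      (if v ∈ ord then (ord.idxOf v : Int) else (ord.length : Int)) :: pvNlSpec (PySem.Set.add ord v) l

-- A's loop, run from the state B would build for the distinct prefix `ord`
theorem pv_loopA (l : List String) (ord : List String) (nl : List Int) (hnd : ord.Nodup) :
    l.foldl pvStepA (pvMkV2C ord, pvMkC2V ord, nl, (ord.length : Int)) =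
      (pvMkV2C (PySem.Set.update ord l), pvMkC2V (PySem.Set.update ord l),
       nl ++ pvNlSpec ord l, ((PySem.Set.update ord l).length : Int)) := by
  induction l generalizing ord nl with
  | nil => simp [PySem.Set.update_nil, pvNlSpec]
  | cons v l ih =>
    rw [List.foldl_cons, PySem.Set.update_cons]
    by_cases hv : v ∈ ord
    · have hstep : pvStepA (pvMkV2C ord, pvMkC2V ord, nl, (ord.length : Int)) v =
          (pvMkV2C ord, pvMkC2V ord, nl ++ [(ord.idxOf v : Int)], (ord.length : Int)) := by
        simp only [pvStepA, pv_get?_mkV2C ord hnd v, if_pos hv]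
        simp
      rw [hstep, pv_add_of_mem ord v hv, ih ord _ hnd]
      simp [pvNlSpec, hv]
    · have hstep : pvStepA (pvMkV2C ord, pvMkC2V ord, nl, (ord.length : Int)) v =
          (pvMkV2C (ord ++ [v]), pvMkC2V (ord ++ [v]), nl ++ [(ord.length : Int)],
           (ord.length : Int) + 1) := by
        simp only [pvStepA, pv_get?_mkV2C ord hnd v, if_neg hv]
        rw [pvMkV2C_append, pvMkC2V_append]
        simp [PySem.Dict.get?_insert_self]
      have hnd' : (ord ++ [v]).Nodup := by
        simp only [List.nodup_append, hnd, List.nodup_singleton, true_and]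
        intro a ha b hb hab
        simp only [List.mem_singleton] at hb
        exact hv (hb ▸ hab ▸ ha)
      rw [hstep, pv_add_of_not_mem ord v hv]
      have h2 := ih (ord ++ [v]) (nl ++ [(ord.length : Int)]) hnd'
      rw [show (((ord ++ [v]).length : Nat) : Int) = (ord.length : Int) + 1 by simp] at h2
      rw [h2]
      simp [pvNlSpec, hv]

-- the per-step indices equal lookups in the final table
theorem pv_nlSpec_eq (l : List String) (ord : List String) (hnd : ord.Nodup) :
    pvNlSpec ord l = l.map (fun v => (pvMkV2C (PySem.Set.update ord l)).getD v 0) := by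
  induction l generalizing ord with
  | nil => simp [pvNlSpec]
  | cons v l ih =>
    have hndU : (PySem.Set.update ord (v :: l)).Nodup := pv_nodup_update _ _ hnd
    have hvU : v ∈ PySem.Set.update ord (v :: l) := pv_mem_update _ _ _ (by simp)
    rw [pvNlSpec, List.map_cons, PySem.Set.update_cons,
        ih (PySem.Set.add ord v) (pv_nodup_add ord v hnd)]
    congr 1
    rw [pv_getD_mkV2C _ (by rw [← PySem.Set.update_cons] at *; exact hndU) v
          (by rw [← PySem.Set.update_cons]; exact hvU)]
    have hvadd : v ∈ PySem.Set.add ord v := by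
      by_cases h : v ∈ ord
      · rw [pv_add_of_mem ord v h]; exact h
      · rw [pv_add_of_not_mem ord v h]; simp
    rw [pv_idxOf_update l (PySem.Set.add ord v) v hvadd]
    by_cases h : v ∈ ord
    · rw [pv_add_of_mem ord v h, if_pos h]
    · rw [pv_add_of_not_mem ord v h, if_neg h, List.idxOf_append_of_notMem h]
      simp

-- ===== VERDICT (by name: the statement is the Claim_ definition above) =====
theorem transform_values_in_classes_spec : Claim_equal_transform_values_in_classes := by
  intro values _
  unfold Spec_transform_values_in_classes transform_values_in_classes transform_values_in_classes_alt
  have h0 : (PySem.Dict.empty, PySem.Dict.empty, ([] : List Int), (0 : Int)) =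
      (pvMkV2C ([] : List String), pvMkC2V ([] : List String), ([] : List Int),
       (([] : List String).length : Int)) := rfl
  rw [h0, pv_loopA values [] [] List.nodup_nil,
      pv_nlSpec_eq values [] List.nodup_nil]
  have hfold : values.foldl PySem.Set.add ([] : List String) = PySem.Set.update [] values := by
    rw [PySem.Set.update_nil_left, PySem.Set.ofList_eq_foldl]
  simp [PySem.Set.empty, hfold]
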